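-- pv_equiv track=rewrite | github.com/kase1111-hash/TorusFold | per_segment_null.py | identify_segments
-- ===== SOURCE A (Python) =====
-- def identify_segments(ss_seq):
--     """
--     Identify contiguous SS segments.
--     Returns list of (start, end, ss_type) tuples.
--     end is exclusive.
--     """
--     if not ss_seq:
--         return []
--     segments = []
--     start = 0
--     current = ss_seq[0]
--     for i in range(1, len(ss_seq)):
--         if ss_seq[i] != current:
--             segments.append((start, i, current))
--             start = i
--             current = ss_seq[i]
--     segments.append((start, len(ss_seq), current))
--     return segments
-- ===== SOURCE B (Python) =====
-- def identify_segments(ss_seq):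
--     """
--     Identify contiguous SS segments.
--     Returns list of (start, end, ss_type) tuples.
--     end is exclusive.
--     Span-based decomposition: consume one whole run at a time with an
--     inner scan, instead of tracking a 'current' symbol element by element.
--     """
--     segments = []
--     start = 0
--     n = len(ss_seq)
--     while start < n:
--         end = start + 1
--         while end < n and ss_seq[end] == ss_seq[start]:
--             end += 1
--         segments.append((start, end, ss_seq[start]))
--         start = end
--     return segments
-- ===== Notes on version B (the rewrite author's own statement) =====
-- stated objective: alternative
-- what changed: Replaced the single element-by-element scan that tracks the last-seen symbol and emits on change with a run-at-a-time two-level scan: an inner loop finds the end of each maximal run, which is emitted whole and becomes the next start.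
import Mathlib
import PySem

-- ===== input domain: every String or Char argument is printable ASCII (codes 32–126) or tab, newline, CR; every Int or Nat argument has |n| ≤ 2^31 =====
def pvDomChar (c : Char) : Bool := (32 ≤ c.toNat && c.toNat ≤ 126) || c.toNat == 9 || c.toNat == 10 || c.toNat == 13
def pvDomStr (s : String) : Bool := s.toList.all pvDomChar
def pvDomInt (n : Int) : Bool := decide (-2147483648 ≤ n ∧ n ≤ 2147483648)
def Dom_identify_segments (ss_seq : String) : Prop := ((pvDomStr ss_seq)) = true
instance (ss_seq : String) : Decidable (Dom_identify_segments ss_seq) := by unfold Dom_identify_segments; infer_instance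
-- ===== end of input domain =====

-- B replaces A's element-by-element last-seen-symbol scan with a run-at-a-time
-- two-level scan (alternative decomposition, same O(n) cost).

-- ===== PORT A =====
-- A's for-loop over i = 1..len-1 with state (segments, start, current), transcribed
-- as the obvious structural recursion over the tail carrying the index i.
def loopA : List Char → Int → Int → Char → List (Int × Int × String) →
    (List (Int × Int × String) × Int × Char)
  | [], _, start, cur, segs => (segs, start, cur)
  | x :: xs, i, start, cur, segs =>
    if x ≠ cur then loopA xs (i + 1) i x (segs ++ [(start, i, String.ofList [cur])])
    else loopA xs (i + 1) start cur segs

def identify_segments (ss_seq : String) : List (Int × Int × String) :=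
  match ss_seq.toList with
  | [] => []
  | c :: rest =>
    let r := loopA rest 1 0 c []
    r.1 ++ [(r.2.1, ((1 + rest.length : Nat) : Int), String.ofList [r.2.2])]

-- ===== PORT B =====
-- Source B's outer while-loop = recursion on the remaining suffix; the inner
-- while-scan for the end of the run = takeWhile/dropWhile on the tail.
def altGo : Int → List Char → List (Int × Int × String)
  | _, [] => []
  | start, c :: rest =>
    let e := start + 1 + (rest.takeWhile (· == c)).length
    (start, e, String.ofList [c]) :: altGo e (rest.dropWhile (· == c))
termination_by _ l => l.length
decreasing_by
  simp only [List.length_cons]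
  exact Nat.lt_succ_of_le (List.length_dropWhile_le _ _)

def identify_segments_alt (ss_seq : String) : List (Int × Int × String) :=
  altGo 0 ss_seq.toList

-- ===== PRECONDITION & SPEC =====
def Spec_identify_segments (ss_seq : String) (out : List (Int × Int × String)) : Prop := out = identify_segments_alt ss_seq
instance (ss_seq : String) (out : List (Int × Int × String)) : Decidable (Spec_identify_segments ss_seq out) := by unfold Spec_identify_segments; infer_instance

-- ===== CLAIM (what is proved, stated in full; the proofs are below) =====
def Claim_equal_identify_segments : Prop := ∀ (ss_seq : String), Dom_identify_segments ss_seq → Spec_identify_segments ss_seq (identify_segments ss_seq)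

-- ===== LEMMAS AND PROOFS =====

-- "inside a segment of cur that started at start; next index is i"
def altGoCont (start i : Int) (cur : Char) (rest : List Char) : List (Int × Int × String) :=
  (start, i + (rest.takeWhile (· == cur)).length, String.ofList [cur]) ::
    altGo (i + (rest.takeWhile (· == cur)).length) (rest.dropWhile (· == cur))

lemma altGo_cons (start : Int) (c : Char) (rest : List Char) :
    altGo start (c :: rest) = altGoCont start (start + 1) c rest := by
  rw [altGo]
  simp [altGoCont, add_assoc]

lemma loopA_eq_altGoCont (rest : List Char) :
    ∀ (i start : Int) (cur : Char) (segs : List (Int × Int × String)),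
    (loopA rest i start cur segs).1 ++
      [((loopA rest i start cur segs).2.1, i + rest.length,
        String.ofList [(loopA rest i start cur segs).2.2])]
      = segs ++ altGoCont start i cur rest := by
  induction rest with
  | nil =>
    intro i start cur segs
    simp [loopA, altGoCont, altGo]
  | cons x xs ih =>
    intro i start cur segs
    by_cases hx : x = cur
    · subst hx
      rw [loopA]
      simp only [ne_eq, not_true_eq_false, if_false] at *
      have h := ih (i + 1) start x segs
      simp only [List.length_cons] at *
      have hc : i + ((xs.length + 1 : Nat) : Int) = i + 1 + xs.length := by push_cast; ring
      rw [hc, h]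
      simp [altGoCont, List.takeWhile, List.dropWhile]
      constructor
      · ring
      · congr 1
        ring
    · rw [loopA]
      simp only [ne_eq, hx, not_false_eq_true, if_true]
      have h := ih (i + 1) i x (segs ++ [(start, i, String.ofList [cur])])
      simp only [List.length_cons] at *
      have hc : i + ((xs.length + 1 : Nat) : Int) = i + 1 + xs.length := by push_cast; ring
      rw [hc, h]
      have hb : (x == cur) = false := by simp [hx]
      have htw : (x :: xs).takeWhile (· == cur) = [] := by
        simp [List.takeWhile, hb]
      have hdw : (x :: xs).dropWhile (· == cur) = x :: xs := by
        simp [List.dropWhile, hb]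
      simp [altGoCont, htw, hdw, altGo_cons, List.append_assoc]

-- ===== VERDICT (by name: the statement is the Claim_ definition above) =====
theorem identify_segments_spec : Claim_equal_identify_segments := by
  intro s _
  unfold Spec_identify_segments identify_segments identify_segments_alt
  cases hs : s.toList with
  | nil =>
    show ([] : List (Int × Int × String)) = altGo 0 []
    simp [altGo]
  | cons c rest =>
    show (loopA rest 1 0 c []).1 ++
        [((loopA rest 1 0 c []).2.1, ((1 + rest.length : Nat) : Int),
          String.ofList [(loopA rest 1 0 c []).2.2])] = altGo 0 (c :: rest)
    have h := loopA_eq_altGoCont rest 1 0 c []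
    simp only [List.nil_append] at h
    have hc : ((1 + rest.length : Nat) : Int) = 1 + (rest.length : Int) := by push_cast; ring
    rw [hc, h, altGo_cons]
    norm_num
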